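-- pv_equiv track=rewrite | github.com/johnforgit/leetcode | Leetcode3839. Number of prefix connected groups/Solution.py | prefixConnected
-- ===== SOURCE A (Python) =====
-- from typing import List
--
-- from collections import defaultdict
--
-- def prefixConnected(words: List[str], k: int) -> int:
--     groups = defaultdict(list)
--
--     for word in words:
--         if len(word) >= k:
--             prefix = word[:k]
--             groups[prefix].append(word)
--
--     count = 0
--     for g in groups.values():
--         if len(g) > 1:
--             count += 1
--
--     return count
-- ===== SOURCE B (Python) =====
-- from typing import List
--
--
-- def prefixConnected(words: List[str], k: int) -> int:
--     # Sort the k-prefixes of the sufficiently long words, then scan the sorted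
--     # list run by run: each maximal run of equal prefixes with length > 1 is
--     # one connected group. No dictionary is built.
--     ps = sorted(w[:k] for w in words if len(w) >= k)
--     count = 0
--     while ps:
--         head = ps[0]
--         run = 1
--         while run < len(ps) and ps[run] == head:
--             run += 1
--         if run > 1:
--             count += 1
--         ps = ps[run:]
--     return count
-- ===== Notes on version B (the rewrite author's own statement) =====
-- stated objective: alternative
-- what changed: Replaces A's dict-of-lists grouping plus a second pass over the groups by sort-then-scan: sort the k-prefixes of the sufficiently long words and count maximal runs of equal adjacent prefixes of length greater than 1, building no dictionary.
import Mathlib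
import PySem

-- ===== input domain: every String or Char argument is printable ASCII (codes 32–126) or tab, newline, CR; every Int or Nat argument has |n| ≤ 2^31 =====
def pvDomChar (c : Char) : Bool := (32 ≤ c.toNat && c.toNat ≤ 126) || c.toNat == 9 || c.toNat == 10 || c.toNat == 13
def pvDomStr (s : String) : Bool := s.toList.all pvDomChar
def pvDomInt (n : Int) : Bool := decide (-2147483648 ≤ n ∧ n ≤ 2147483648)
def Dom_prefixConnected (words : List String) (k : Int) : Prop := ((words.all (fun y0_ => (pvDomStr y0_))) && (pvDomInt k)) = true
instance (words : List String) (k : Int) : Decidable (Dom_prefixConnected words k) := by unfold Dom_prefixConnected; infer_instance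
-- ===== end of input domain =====

-- B replaces A's dict-of-lists grouping by sort-then-scan: it sorts the k-prefixes and counts
-- maximal runs of equal adjacent prefixes of length > 1; alternative algorithm, same result.


-- ===== PORT A =====
def prefixConnected (words : List String) (k : Int) : Int :=
  let groups : PySem.Dict String (List String) :=
    words.foldl (fun g word =>
      if k ≤ PySem.Str.len word then
        g.modify (PySem.Str.slice word none (some k)) [] (fun l => l ++ [word])
      else g) PySem.Dict.empty
  groups.values.foldl (fun count g => if 1 < (g.length : Int) then count + 1 else count) 0

-- ===== PORT B =====
-- the outer 'while ps:' loop of Source B; the inner 'while' advances over the run of ps[0]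
def pcLoop : List String → Int → Int
  | [], count => count
  | head :: rest, count =>
      let runTail := rest.takeWhile (fun y => y == head)
      let run : Int := 1 + (runTail.length : Int)
      pcLoop (rest.dropWhile (fun y => y == head)) (if 1 < run then count + 1 else count)
  termination_by ps _ => ps.length
  decreasing_by
    exact Nat.lt_succ_of_le (List.length_dropWhile_le _ _)

def prefixConnected_alt (words : List String) (k : Int) : Int :=
  let ps := PySem.List.sorted
    (words.filterMap (fun w =>
      if k ≤ PySem.Str.len w then some (PySem.Str.slice w none (some k)) else none))
    (fun x => x) false
  pcLoop ps 0

-- ===== PRECONDITION & SPEC =====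
def Spec_prefixConnected (words : List String) (k : Int) (out : Int) : Prop := out = prefixConnected_alt words k
instance (words : List String) (k : Int) (out : Int) : Decidable (Spec_prefixConnected words k out) := by unfold Spec_prefixConnected; infer_instance

-- ===== CLAIM (what is proved, stated in full; the proofs are below) =====
def Claim_equal_prefixConnected : Prop := ∀ (words : List String) (k : Int), Dom_prefixConnected words k → Spec_prefixConnected words k (prefixConnected words k)

-- ===== LEMMAS AND PROOFS =====

-- the common value both sides are reduced to: how many distinct prefixes occur at least twice
def pcDup (P : List String) : Nat :=
  (PySem.List.dedup P).countP (fun p => decide (2 ≤ P.count p))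

-- A's fold over words with the length guard is the fold over (prefix, word) pairs
theorem pcFoldA_eq (words : List String) (k : Int) (d : PySem.Dict String (List String)) :
    words.foldl (fun g word =>
      if k ≤ PySem.Str.len word then
        g.modify (PySem.Str.slice word none (some k)) [] (fun l => l ++ [word])
      else g) d
    = (words.filterMap (fun w =>
        if k ≤ PySem.Str.len w then some (PySem.Str.slice w none (some k), w) else none)).foldl
        (fun g p => g.modify p.1 [] (fun l => l ++ [p.2])) d := by
  induction words generalizing d with
  | nil => rfl
  | cons w rest ih =>
    simp only [List.foldl_cons, List.filterMap_cons]
    by_cases h : k ≤ PySem.Str.len w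
    · simp only [if_pos h]
      exact ih _
    · simp only [if_neg h]
      exact ih _

theorem pcMapFst (words : List String) (k : Int) :
    (words.filterMap (fun w =>
        if k ≤ PySem.Str.len w then some (PySem.Str.slice w none (some k), w) else none)).map Prod.fst
    = words.filterMap (fun w =>
        if k ≤ PySem.Str.len w then some (PySem.Str.slice w none (some k)) else none) := by
  rw [List.map_filterMap]
  apply List.filterMap_congr
  intro w _
  by_cases h : k ≤ PySem.Str.len w
  · simp only [if_pos h, Option.map_some]
  · simp only [if_neg h, Option.map_none]

-- A's value equals pcDup of the prefix list
theorem pcA_eq (words : List String) (k : Int) :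
    prefixConnected words k
    = (pcDup (words.filterMap (fun w =>
        if k ≤ PySem.Str.len w then some (PySem.Str.slice w none (some k)) else none)) : Int) := by
  rw [← pcMapFst words k]
  unfold prefixConnected
  rw [pcFoldA_eq]
  set l := words.filterMap (fun w =>
    if k ≤ PySem.Str.len w then some (PySem.Str.slice w none (some k), w) else none) with hl
  set g := List.foldl (fun g p => g.modify p.1 [] fun x => x ++ [p.2]) PySem.Dict.empty l with hg
  have hnodup : g.keys.Nodup := by
    rw [hg]
    exact PySem.Dict.nodup_keys_foldl_modify_key l Prod.fst [] (fun _ p x => x ++ [p.2])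
      PySem.Dict.empty (by simp)
  have hkeys : g.keys = PySem.List.dedup (l.map Prod.fst) := by
    rw [hg]
    have := PySem.Dict.keys_foldl_modify_key l Prod.fst [] (fun _ p x => x ++ [p.2]) PySem.Dict.empty
    simpa using this
  have hlen : ∀ c, (g.getD c []).length = (l.map Prod.fst).count c := by
    intro c
    rw [hg, PySem.Dict.getD_foldl_modify_append, PySem.Dict.getD_empty]
    simp only [List.nil_append, List.length_map, List.count, List.countP_map]
    rw [← List.countP_eq_length_filter]
    rfl
  rw [PySem.List.foldl_ite_add_one (fun (gl : List String) => 1 < (gl.length : Int))]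
  rw [PySem.Dict.values_eq_map_keys g hnodup []]
  rw [List.countP_map, hkeys, zero_add]
  unfold pcDup
  congr 1
  apply List.countP_congr
  intro p _
  simp only [Function.comp_apply]
  rw [show ((g.getD p []).length : Int) = (((l.map Prod.fst).count p : Nat) : Int) by
    rw [hlen p]]
  simp only [decide_eq_true_eq]
  omega

-- head of a dropWhile does not satisfy the predicate
theorem pcDropWhile_head (p : String → Bool) (l : List String) (z : String) (d' : List String)
    (h : l.dropWhile p = z :: d') : p z = false := by
  induction l with
  | nil => simp at h
  | cons a l ih =>
    rw [List.dropWhile_cons] at h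
    by_cases ha : p a
    · rw [if_pos ha] at h; exact ih h
    · rw [if_neg ha] at h
      cases h
      simpa using ha

theorem pcLoop_cons (x : String) (rest : List String) (c : Int) :
    pcLoop (x :: rest) c
    = pcLoop (rest.dropWhile (fun y => y == x))
        (if 1 < 1 + (((rest.takeWhile (fun y => y == x)).length : Nat) : Int) then c + 1 else c) := by
  rw [pcLoop]

-- scanning a sorted list run by run counts the duplicated elements
theorem pcLoop_sorted (n : Nat) : ∀ (S : List String), S.length ≤ n →
    S.Pairwise (· ≤ ·) → ∀ c : Int, pcLoop S c = c + (pcDup S : Int) := by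
  induction n with
  | zero =>
    intro S hS _ c
    have hnil : S = [] := List.eq_nil_of_length_eq_zero (Nat.le_zero.mp hS)
    subst hnil
    simp [pcLoop, pcDup]
  | succ n ih =>
    intro S hS hp c
    cases S with
    | nil => simp [pcLoop, pcDup]
    | cons x rest =>
      set t := rest.takeWhile (fun y => y == x) with ht
      set d := rest.dropWhile (fun y => y == x) with hd
      have htd : t ++ d = rest := List.takeWhile_append_dropWhile
      have htx : ∀ y ∈ t, y = x := by
        intro y hy
        have := List.mem_takeWhile_imp (ht ▸ hy)
        simpa using this
      have hpc := List.pairwise_cons.mp hp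
      have hxle : ∀ y ∈ rest, x ≤ y := hpc.1
      have hrp : rest.Pairwise (· ≤ ·) := hpc.2
      have hdp : d.Pairwise (· ≤ ·) :=
        List.Pairwise.sublist (hd ▸ List.dropWhile_sublist (fun y => y == x)) hrp
      have hxd : x ∉ d := by
        intro hxd
        cases hdd : d with
        | nil => rw [hdd] at hxd; simp at hxd
        | cons z d' =>
          have hz : ((fun y => y == x) z) = false :=
            pcDropWhile_head _ rest z d' (by rw [← hd, hdd])
          have hzx : z ≠ x := by simpa using hz
          have hzrest : z ∈ rest :=
            (hd ▸ List.dropWhile_sublist (fun y => y == x)).mem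
              (by rw [hdd]; exact List.mem_cons_self)
          have hzled : ∀ y ∈ d, z ≤ y := by
            intro y hy
            rw [hdd] at hy hdp
            rcases List.mem_cons.mp hy with h | h
            · exact h ▸ le_rfl
            · exact (List.pairwise_cons.mp hdp).1 y h
          exact hzx (le_antisymm (hzled x hxd) (hxle z hzrest))
      have hcx : (x :: rest).count x = 1 + t.length := by
        rw [List.count_cons_self, ← htd, List.count_append]
        rw [List.count_eq_zero.mpr hxd, List.count_eq_length.mpr (fun b hb => (htx b hb).symm)]
        omega
      have hcy : ∀ y, y ≠ x → (x :: rest).count y = d.count y := by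
        intro y hy
        rw [List.count_cons_of_ne hy.symm, ← htd, List.count_append]
        have hyt : y ∉ t := fun hyt => hy (htx y hyt)
        rw [List.count_eq_zero.mpr hyt, Nat.zero_add]
      have hperm : (PySem.List.dedup (x :: rest)).Perm (x :: PySem.List.dedup d) := by
        refine (List.perm_ext_iff_of_nodup (PySem.List.nodup_dedup _)
          (List.nodup_cons.mpr ⟨fun h => hxd (by rw [PySem.List.mem_dedup] at h; exact h),
            PySem.List.nodup_dedup _⟩)).2 ?_
        intro a
        rw [PySem.List.mem_dedup]
        simp only [List.mem_cons, PySem.List.mem_dedup]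
        constructor
        · rintro (rfl | ha)
          · exact Or.inl rfl
          · rw [← htd] at ha
            rcases List.mem_append.mp ha with h | h
            · exact Or.inl (htx a h)
            · exact Or.inr h
        · rintro (rfl | ha)
          · exact Or.inl rfl
          · refine Or.inr ?_
            rw [← htd]
            exact List.mem_append_right _ ha
      have hdlen : d.length ≤ n := by
        have h1 := List.length_dropWhile_le (fun y => y == x) rest
        simp only [List.length_cons] at hS
        rw [hd]
        omega
      have hIH := ih d hdlen hdp (if 1 < 1 + ((t.length : Nat) : Int) then c + 1 else c)
      rw [pcLoop_cons, ← ht, ← hd, hIH]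
      unfold pcDup
      rw [hperm.countP_eq, List.countP_cons]
      have hcongr : (PySem.List.dedup d).countP (fun p => decide (2 ≤ d.count p))
          = (PySem.List.dedup d).countP (fun p => decide (2 ≤ (x :: rest).count p)) := by
        apply List.countP_congr
        intro p hp'
        have hpd : p ∈ d := by rw [PySem.List.mem_dedup] at hp'; exact hp'
        rw [hcy p (fun h => hxd (h ▸ hpd))]
      rw [hcongr, hcx]
      by_cases h0 : 0 < t.length
      · rw [if_pos (by push_cast; omega : (1:Int) < 1 + ((t.length : Nat) : Int))]
        have hdec : (decide (2 ≤ 1 + t.length)) = true := by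
          rw [decide_eq_true_iff]; omega
        rw [hdec, if_pos rfl]
        push_cast
        ring
      · rw [if_neg (by push_cast; omega : ¬ (1:Int) < 1 + ((t.length : Nat) : Int))]
        have hdec : (decide (2 ≤ 1 + t.length)) = false := by
          rw [decide_eq_false_iff_not]; omega
        rw [hdec, if_neg Bool.false_ne_true]
        push_cast
        ring

theorem pcDup_perm (P Q : List String) (h : P.Perm Q) : pcDup P = pcDup Q := by
  unfold pcDup
  have hmem : ∀ a, a ∈ PySem.List.dedup P ↔ a ∈ PySem.List.dedup Q := by
    intro a
    rw [PySem.List.mem_dedup, PySem.List.mem_dedup, h.mem_iff]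
  have hperm : (PySem.List.dedup P).Perm (PySem.List.dedup Q) :=
    (List.perm_ext_iff_of_nodup (PySem.List.nodup_dedup P) (PySem.List.nodup_dedup Q)).2 hmem
  rw [hperm.countP_eq]
  apply List.countP_congr
  intro p _
  simp [h.count_eq]

-- ===== VERDICT (by name: the statement is the Claim_ definition above) =====
theorem prefixConnected_spec : Claim_equal_prefixConnected := by
  intro words k _
  unfold Spec_prefixConnected
  set P := words.filterMap (fun w =>
    if k ≤ PySem.Str.len w then some (PySem.Str.slice w none (some k)) else none) with hP
  have hA := pcA_eq words k
  have hB : prefixConnected_alt words k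
      = (pcDup (PySem.List.sorted P (fun x => x) false) : Int) := by
    unfold prefixConnected_alt
    rw [← hP]
    have := pcLoop_sorted (PySem.List.sorted P (fun x => x) false).length
      (PySem.List.sorted P (fun x => x) false) le_rfl
      (PySem.List.sorted_pairwise P (fun x => x)) 0
    simpa using this
  rw [hA, hB, pcDup_perm P (PySem.List.sorted P (fun x => x) false)
    (PySem.List.sorted_perm P (fun x => x) false).symm]
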